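-- pv_equiv track=rewrite | github.com/MShel/puzzles | Puzzles/graphs/SwapLexOrder.py | dfs
-- ===== SOURCE A (Python) =====
-- def dfs(node, graph=[]):
--     s = [node]
--     d = []
--     visited = set()
--     while s:
--         u = s.pop()
--         if u in visited:
--             continue
--         visited.add(u)
--         d.append(u)
--         for v in graph[u]:
--             s.append(v)
--     d.sort()
--     return d
-- ===== SOURCE B (Python) =====
-- def dfs(node, graph=[]):
--     # Round-based reachability closure: repeatedly sweep the visited set,
--     # adding every neighbour of a visited node, until a sweep adds nothing.
--     visited = {node}
--     changed = True
--     while changed: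
--         changed = False
--         for u in list(visited):
--             for v in graph[u]:
--                 if v not in visited:
--                     visited.add(v)
--                     changed = True
--     return sorted(visited)
-- ===== Notes on version B (the rewrite author's own statement) =====
-- stated objective: alternative
-- what changed: Replaces the explicit-stack DFS worklist with a round-based reachability closure: repeatedly sweep the whole visited set adding every neighbour of a visited node until a sweep adds nothing, then sort; the explicit stack and the output list d disappear.
-- outside the precondition, e.g. on dfs(0, [[0], [5]]): A returns [0], B returns [0]
import Mathlib
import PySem

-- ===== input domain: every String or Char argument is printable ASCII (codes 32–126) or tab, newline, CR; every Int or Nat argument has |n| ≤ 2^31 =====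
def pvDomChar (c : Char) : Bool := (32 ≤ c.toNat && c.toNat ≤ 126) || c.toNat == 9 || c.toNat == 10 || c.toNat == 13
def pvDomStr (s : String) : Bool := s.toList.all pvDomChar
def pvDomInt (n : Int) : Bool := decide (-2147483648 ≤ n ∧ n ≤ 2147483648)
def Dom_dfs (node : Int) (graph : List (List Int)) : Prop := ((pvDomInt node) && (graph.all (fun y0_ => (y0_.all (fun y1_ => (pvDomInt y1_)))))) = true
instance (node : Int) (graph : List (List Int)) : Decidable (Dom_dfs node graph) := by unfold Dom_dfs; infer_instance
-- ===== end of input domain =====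

-- B replaces A's explicit-stack DFS worklist by a round-based reachability closure
-- (sweep the visited set adding neighbours until a sweep adds nothing), same sorted result.


-- ===== PORT A =====

-- row fetched by graph[u] is an element of graph (used for ranges and termination)
lemma mem_of_pyGet?_eq_some {α : Type} (xs : List α) (i : Int) (r : α)
    (h : PySem.List.pyGet? xs i = some r) : r ∈ xs := by
  simp [PySem.List.pyGet?, PySem.List.pyIdx?] at h
  split at h <;> split at h <;> simp at h <;> exact List.mem_of_getElem? h

-- adding a fresh in-range node shrinks the unvisited part of the index range (termination of A's loop)
lemma unvisited_card_lt (graph : List (List Int)) (visited : List Int) (u : Int)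
    (hu : u ∉ visited) (h1 : -(graph.length : Int) ≤ u) (h2 : u < graph.length) :
    (((Finset.Icc (-(graph.length : Int)) ((graph.length : Int) - 1)).filter
        (fun x => x ∉ PySem.Set.add visited u)).card) <
    (((Finset.Icc (-(graph.length : Int)) ((graph.length : Int) - 1)).filter
        (fun x => x ∉ visited)).card) := by
  apply Finset.card_lt_card
  rw [Finset.ssubset_iff_of_subset]
  · exact ⟨u, by simp [Finset.mem_filter, Finset.mem_Icc, hu]; omega⟩
  · intro x hx
    simp only [Finset.mem_filter, PySem.Set.mem_add] at hx ⊢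
    exact ⟨hx.1, fun hmem => hx.2 (Or.inl hmem)⟩

def dfsLoop (graph : List (List Int)) (s : List Int) (visited : PySem.Set Int) (d : List Int) : List Int :=
  if hs : s = [] then PySem.List.sorted d (fun x => x)          -- while s exhausted: d.sort(); return d
  else
    let u := s.getLast hs                                       -- u = s.pop()
    if hu : u ∈ visited then dfsLoop graph s.dropLast visited d   -- continue
    else
      match hrow : PySem.List.pyGet? graph u with                   -- graph[u]
      | none => PySem.List.sorted d (fun x => x)                -- Python raises IndexError here (excluded by Pre_)
      | some row => dfsLoop graph (s.dropLast ++ row) (PySem.Set.add visited u) (d ++ [u])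
termination_by ((((Finset.Icc (-(graph.length : Int)) ((graph.length : Int) - 1)).filter
      (fun x => x ∉ visited)).card), s.length)
decreasing_by
  · apply Prod.Lex.right
    have := List.length_pos_iff.mpr hs
    rw [List.length_dropLast]; omega
  · apply Prod.Lex.left
    have hir : ¬ (PySem.List.pyGet? graph u = none) := by rw [hrow]; simp
    rw [PySem.List.pyGet?_eq_none_iff] at hir
    simp [PySem.Raise.InRange] at hir
    exact unvisited_card_lt graph visited u hu (by omega) (by omega)

def dfs (node : Int) (graph : List (List Int)) : List Int :=
  dfsLoop graph [node] PySem.Set.empty []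

-- ===== PORT B =====

-- inner loop: for v in graph[u]: if v not in visited: visited.add(v); changed = True
def sweepRow (st : PySem.Set Int × Bool) (row : List Int) : PySem.Set Int × Bool :=
  row.foldl (fun st v => if v ∈ st.1 then st else (PySem.Set.add st.1 v, true)) st

-- middle loop: for u in list(visited): …  (none = IndexError in Python, excluded by Pre_)
def sweep (graph : List (List Int)) : List Int → PySem.Set Int × Bool → Option (PySem.Set Int × Bool)
  | [], st => some st
  | u :: rest, st =>
    match PySem.List.pyGet? graph u with
    | none => none
    | some row => sweep graph rest (sweepRow st row)

-- facts about sweep cited by dfsAltLoop's termination proof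
lemma sweepRow_cons (st : PySem.Set Int × Bool) (v : Int) (row : List Int) :
    sweepRow st (v :: row) =
      sweepRow (if v ∈ st.1 then st else (PySem.Set.add st.1 v, true)) row := rfl

lemma sweepRow_mono (row : List Int) (st : PySem.Set Int × Bool) :
    ∀ x ∈ st.1, x ∈ (sweepRow st row).1 := by
  induction row generalizing st with
  | nil => exact fun x hx => hx
  | cons v t ih =>
    intro x hx
    rw [sweepRow_cons]
    by_cases hv : v ∈ st.1
    · simp only [if_pos hv]; exact ih st x hx
    · simp only [if_neg hv]; exact ih _ x (by simp [PySem.Set.mem_add, hx])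

lemma sweepRow_changed (row : List Int) (st : PySem.Set Int × Bool)
    (h : (sweepRow st row).2 = true) :
    st.2 = true ∨ ∃ w ∈ row, w ∉ st.1 ∧ w ∈ (sweepRow st row).1 := by
  induction row generalizing st with
  | nil => exact Or.inl h
  | cons v t ih =>
    rw [sweepRow_cons] at h ⊢
    by_cases hv : v ∈ st.1
    · rw [if_pos hv] at h ⊢
      rcases ih st h with h' | ⟨w, hw, hn, hm⟩
      · exact Or.inl h'
      · exact Or.inr ⟨w, by simp [hw], hn, hm⟩
    · rw [if_neg hv] at h ⊢
      refine Or.inr ⟨v, by simp, hv, ?_⟩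
      exact sweepRow_mono t _ v (by simp [PySem.Set.mem_add])

lemma sweep_mono (graph : List (List Int)) (snap : List Int) (st st' : PySem.Set Int × Bool)
    (h : sweep graph snap st = some st') : ∀ x ∈ st.1, x ∈ st'.1 := by
  induction snap generalizing st with
  | nil => simp only [sweep, Option.some.injEq] at h; subst h; exact fun x hx => hx
  | cons u rest ih =>
    simp only [sweep] at h
    split at h
    · exact absurd h (by simp)
    · exact fun x hx => ih _ h x (sweepRow_mono _ st x hx)

lemma sweep_grow (graph : List (List Int)) (snap : List Int) (st st' : PySem.Set Int × Bool)
    (h : sweep graph snap st = some st') (hc : st'.2 = true) (hch : st.2 = false) :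
    ∃ w ∈ graph.flatten, w ∉ st.1 ∧ w ∈ st'.1 := by
  induction snap generalizing st with
  | nil =>
    simp only [sweep, Option.some.injEq] at h; subst h
    rw [hc] at hch; exact absurd hch (by simp)
  | cons u rest ih =>
    simp only [sweep] at h
    split at h
    · exact absurd h (by simp)
    · rename_i row hrow
      by_cases h2 : (sweepRow st row).2 = true
      · rcases sweepRow_changed row st h2 with h' | ⟨w, hw, hn, hm⟩
        · rw [h'] at hch; exact absurd hch (by simp)
        · exact ⟨w, List.mem_flatten.mpr ⟨row, mem_of_pyGet?_eq_some _ _ _ hrow, hw⟩, hn,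
            sweep_mono graph rest _ st' h w hm⟩
      · rcases ih _ h (by simpa using h2) with ⟨w, hwf, hn, hm⟩
        exact ⟨w, hwf, fun hx => hn (sweepRow_mono row st w hx), hm⟩

-- visited strictly grew: the unvisited part of the node universe shrinks (termination of B's loop)
lemma flatten_card_lt (graph : List (List Int)) (visited v' : List Int)
    (hsub : ∀ x ∈ visited, x ∈ v') (w : Int) (hwf : w ∈ graph.flatten)
    (hwn : w ∉ visited) (hwv : w ∈ v') :
    ((graph.flatten.toFinset.filter (fun x => x ∉ v')).card) <
    ((graph.flatten.toFinset.filter (fun x => x ∉ visited)).card) := by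
  apply Finset.card_lt_card
  rw [Finset.ssubset_iff_of_subset]
  · exact ⟨w, by simp [Finset.mem_filter, List.mem_toFinset, hwf, hwn, hwv]⟩
  · intro x hx
    simp only [Finset.mem_filter] at hx ⊢
    exact ⟨hx.1, fun hmem => hx.2 (hsub x hmem)⟩

-- outer loop: while changed: changed = False; sweep
def dfsAltLoop (graph : List (List Int)) (visited : PySem.Set Int) : List Int :=
  match h : sweep graph visited (visited, false) with
  | none => PySem.List.sorted visited (fun x => x)             -- Python raises IndexError here (excluded by Pre_)
  | some (v', c') =>
    if hc : c' = true then dfsAltLoop graph v'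
    else PySem.List.sorted v' (fun x => x)                     -- return sorted(visited)
termination_by ((graph.flatten.toFinset.filter (fun x => x ∉ visited)).card)
decreasing_by
  rcases sweep_grow graph visited (visited, false) (v', c') h (by simpa using hc) rfl with
    ⟨w, hwf, hwn, hwv⟩
  exact flatten_card_lt graph visited v' (sweep_mono graph visited _ _ h) w hwf hwn hwv

def dfs_alt (node : Int) (graph : List (List Int)) : List Int :=
  dfsAltLoop graph (PySem.Set.ofList [node])

-- ===== PRECONDITION & SPEC =====
-- Pre_ excludes inputs containing any out-of-range index (the start node or a listed neighbour
-- outside [-len(graph), len(graph))), on which A may raise IndexError; the condition is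
-- conservative and closed-form, so it also excludes inputs whose only bad indices are unreachable
-- (there A returns normally, and B returns the same value).
def Pre_dfs (node : Int) (graph : List (List Int)) : Prop :=
  (-(graph.length : Int) ≤ node ∧ node < graph.length) ∧
  ∀ row ∈ graph, ∀ v ∈ row, -(graph.length : Int) ≤ v ∧ v < graph.length
instance (node : Int) (graph : List (List Int)) : Decidable (Pre_dfs node graph) := by
  unfold Pre_dfs; infer_instance

def pvWitness_dfs : Int × List (List Int) := (0, [[1, 0], [0]])

def Spec_dfs (node : Int) (graph : List (List Int)) (out : List Int) : Prop := out = dfs_alt node graph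
instance (node : Int) (graph : List (List Int)) (out : List Int) : Decidable (Spec_dfs node graph out) := by unfold Spec_dfs; infer_instance

-- ===== CLAIM (what is proved, stated in full; the proofs are below) =====
def Claim_equal_dfs : Prop := ∀ (node : Int) (graph : List (List Int)), Dom_dfs node graph → Pre_dfs node graph → Spec_dfs node graph (dfs node graph)

-- ===== LEMMAS AND PROOFS =====

-- reachability from a node through graph[·] lookups: the set both programs compute (then sort)
inductive Reach (graph : List (List Int)) (n : Int) : Int → Prop
  | refl : Reach graph n n
  | step {u v : Int} {row : List Int} : Reach graph n u →
      PySem.List.pyGet? graph u = some row → v ∈ row → Reach graph n v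

-- any list containing the start node and closed under neighbour lookups contains all reachable nodes
lemma reach_subset (graph : List (List Int)) (node : Int) (l : List Int)
    (hnode : node ∈ l)
    (hcl : ∀ u ∈ l, ∀ row, PySem.List.pyGet? graph u = some row → ∀ v ∈ row, v ∈ l) :
    ∀ x, Reach graph node x → x ∈ l := by
  intro x hx
  induction hx with
  | refl => exact hnode
  | step _ hrow hv ih => exact hcl _ ih _ hrow _ hv

-- A's loop computes (then sorts) a duplicate-free list whose members are exactly the closure
lemma dfsLoop_main (graph : List (List Int)) (R : Int → Prop)
    (hPre : ∀ row ∈ graph, ∀ v ∈ row, -(graph.length : Int) ≤ v ∧ v < graph.length)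
    (hRstep : ∀ u row v, R u → PySem.List.pyGet? graph u = some row → v ∈ row → R v) :
    ∀ (s : List Int) (visited : PySem.Set Int) (d : List Int),
    (∀ x ∈ s, R x ∧ (-(graph.length : Int) ≤ x ∧ x < graph.length)) →
    (∀ x ∈ visited, R x) →
    (∀ u ∈ visited, ∀ row, PySem.List.pyGet? graph u = some row → ∀ v ∈ row, v ∈ visited ∨ v ∈ s) →
    (∀ x, x ∈ d ↔ x ∈ visited) → d.Nodup →
    ∃ l : List Int, dfsLoop graph s visited d = PySem.List.sorted l (fun x => x) ∧ l.Nodup ∧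
      (∀ x ∈ visited, x ∈ l) ∧ (∀ x ∈ s, x ∈ l) ∧ (∀ x ∈ l, R x) ∧
      (∀ u ∈ l, ∀ row, PySem.List.pyGet? graph u = some row → ∀ v ∈ row, v ∈ l) := by
  intro s visited d
  induction s, visited, d using dfsLoop.induct (graph := graph) with
  | case1 visited d =>
    intro _ h2 h3 h4 h5
    refine ⟨d, by rw [dfsLoop]; rfl, h5, fun x hx => (h4 x).mpr hx, by simp,
      fun x hx => h2 x ((h4 x).mp hx), ?_⟩
    intro u hu row hrow v hv
    rcases h3 u ((h4 u).mp hu) row hrow v hv with h | h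
    · exact (h4 v).mpr h
    · simp at h
  | case2 s visited d hs u hu ih =>
    intro h1 h2 h3 h4 h5
    have hsplit := List.dropLast_append_getLast hs
    obtain ⟨l, heq, hnd, hv, hssub, hsound, hcl⟩ := ih
      (fun x hx => h1 x ((List.dropLast_sublist s).subset hx))
      h2
      (by intro u' hu' row hrow v hv
          rcases h3 u' hu' row hrow v hv with h | h
          · exact Or.inl h
          · rw [← hsplit] at h
            rcases List.mem_append.mp h with h' | h'
            · exact Or.inr h'
            · simp only [List.mem_singleton] at h'; subst h'; exact Or.inl hu)
      h4 h5
    refine ⟨l, ?_, hnd, hv, ?_, hsound, hcl⟩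
    · rw [dfsLoop, dif_neg hs]
      dsimp only
      split
      · exact heq
      · exact absurd hu (by assumption)
    · intro x hx
      rw [← hsplit] at hx
      rcases List.mem_append.mp hx with h' | h'
      · exact hssub x h'
      · simp only [List.mem_singleton] at h'; subst h'; exact hv _ hu
  | case3 s visited d hs u hu hnone =>
    intro h1 _ _ _ _
    exfalso
    have hr := (h1 _ (List.getLast_mem hs)).2
    rw [PySem.List.pyGet?_eq_none_iff] at hnone
    exact hnone ⟨hr.1, hr.2⟩
  | case4 s visited d hs u hu row hrow ih =>
    intro h1 h2 h3 h4 h5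
    have hum := List.getLast_mem hs
    have hRu := (h1 _ hum).1
    have hrm : row ∈ graph := mem_of_pyGet?_eq_some _ _ _ hrow
    have hsplit := List.dropLast_append_getLast hs
    obtain ⟨l, heq, hnd, hv, hssub, hsound, hcl⟩ := ih
      (by intro x hx
          rcases List.mem_append.mp hx with h | h
          · exact h1 x ((List.dropLast_sublist s).subset h)
          · exact ⟨hRstep _ row x hRu hrow h, hPre row hrm x h⟩)
      (by intro x hx
          rcases (PySem.Set.mem_add visited _ x).mp hx with h | h
          · exact h2 x h
          · subst h; exact hRu)
      (by intro u' hu' row' hrow' v hv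
          rcases (PySem.Set.mem_add visited _ u').mp hu' with h | h
          · rcases h3 u' h row' hrow' v hv with h' | h'
            · exact Or.inl ((PySem.Set.mem_add visited _ v).mpr (Or.inl h'))
            · rw [← hsplit] at h'
              rcases List.mem_append.mp h' with h'' | h''
              · exact Or.inr (List.mem_append_left _ h'')
              · simp only [List.mem_singleton] at h''; subst h''
                exact Or.inl ((PySem.Set.mem_add visited _ _).mpr (Or.inr rfl))
          · subst h
            rw [hrow] at hrow'
            injection hrow' with hr; subst hr
            exact Or.inr (List.mem_append_right _ hv))
      (by intro x
          rw [List.mem_append]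
          simp only [List.mem_singleton]
          rw [PySem.Set.mem_add visited _ x, h4 x])
      (by rw [List.nodup_append]
          exact ⟨h5, List.nodup_singleton _,
            by intro a ha b hb
               simp only [List.mem_singleton] at hb; subst hb
               exact fun he => hu ((h4 _).mp (he ▸ ha))⟩)
    refine ⟨l, ?_, hnd,
      fun x hx => hv x ((PySem.Set.mem_add visited _ x).mpr (Or.inl hx)), ?_, hsound, hcl⟩
    · rw [dfsLoop, dif_neg hs]
      dsimp only
      split
      · exact absurd (by assumption) hu
      · split
        · rename_i hrow2; rw [hrow] at hrow2; exact absurd hrow2 (by simp)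
        · rename_i row' hrow2
          rw [hrow] at hrow2
          injection hrow2 with hr2; subst hr2
          exact heq
    · intro x hx
      rw [← hsplit] at hx
      rcases List.mem_append.mp hx with h | h
      · exact hssub x (List.mem_append_left _ h)
      · simp only [List.mem_singleton] at h; subst h
        exact hv _ ((PySem.Set.mem_add visited _ _).mpr (Or.inr rfl))

-- B's sweep: basic shape facts used by the main lemma
lemma sweepRow_flag (row : List Int) (st : PySem.Set Int × Bool) (h : st.2 = true) :
    (sweepRow st row).2 = true := by
  induction row generalizing st with
  | nil => exact h
  | cons v t ih =>
    rw [sweepRow_cons]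
    by_cases hv : v ∈ st.1
    · simp only [if_pos hv]; exact ih st h
    · simp only [if_neg hv]; exact ih _ rfl

lemma sweep_none (graph : List (List Int)) (snap : List Int) (st : PySem.Set Int × Bool)
    (h : sweep graph snap st = none) : ∃ u ∈ snap, PySem.List.pyGet? graph u = none := by
  induction snap generalizing st with
  | nil => simp [sweep] at h
  | cons u rest ih =>
    simp only [sweep] at h
    split at h
    · exact ⟨u, by simp, by assumption⟩
    · rcases ih _ h with ⟨u', hu', hn⟩
      exact ⟨u', by simp [hu'], hn⟩

lemma sweepRow_nodup (row : List Int) (st : PySem.Set Int × Bool) (h : st.1.Nodup) :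
    (sweepRow st row).1.Nodup := by
  induction row generalizing st with
  | nil => exact h
  | cons v t ih =>
    rw [sweepRow_cons]
    by_cases hv : v ∈ st.1
    · rw [if_pos hv]; exact ih st h
    · rw [if_neg hv]; exact ih _ (PySem.Set.nodup_add st.1 v h)

lemma sweepRow_sound (row : List Int) (st : PySem.Set Int × Bool) :
    ∀ x ∈ (sweepRow st row).1, x ∈ st.1 ∨ x ∈ row := by
  induction row generalizing st with
  | nil => exact fun x hx => Or.inl hx
  | cons v t ih =>
    intro x hx
    rw [sweepRow_cons] at hx
    by_cases hv : v ∈ st.1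
    · rw [if_pos hv] at hx
      rcases ih st x hx with h | h
      · exact Or.inl h
      · exact Or.inr (by simp [h])
    · rw [if_neg hv] at hx
      rcases ih _ x hx with h | h
      · rcases (PySem.Set.mem_add st.1 v x).mp h with h' | h'
        · exact Or.inl h'
        · exact Or.inr (by simp [h'])
      · exact Or.inr (by simp [h])

lemma sweepRow_false (row : List Int) (st : PySem.Set Int × Bool)
    (h : (sweepRow st row).2 = false) : sweepRow st row = st ∧ (∀ v ∈ row, v ∈ st.1) := by
  induction row generalizing st with
  | nil => exact ⟨rfl, by simp⟩
  | cons v t ih =>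
    rw [sweepRow_cons] at h ⊢
    by_cases hv : v ∈ st.1
    · rw [if_pos hv] at h ⊢
      obtain ⟨he, hr⟩ := ih st h
      refine ⟨he, ?_⟩
      intro w hw
      rcases List.mem_cons.mp hw with h' | h'
      · subst h'; exact hv
      · exact hr w h'
    · rw [if_neg hv] at h
      have := sweepRow_flag t (PySem.Set.add st.1 v, true) rfl
      rw [h] at this
      exact absurd this (by simp)

lemma sweep_nodup (graph : List (List Int)) (snap : List Int) (st st' : PySem.Set Int × Bool)
    (h : sweep graph snap st = some st') (hnd : st.1.Nodup) : st'.1.Nodup := by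
  induction snap generalizing st with
  | nil => simp only [sweep, Option.some.injEq] at h; subst h; exact hnd
  | cons u rest ih =>
    simp only [sweep] at h
    split at h
    · exact absurd h (by simp)
    · exact ih _ h (sweepRow_nodup _ st hnd)

lemma sweep_sound (graph : List (List Int)) (snap : List Int) (st st' : PySem.Set Int × Bool)
    (h : sweep graph snap st = some st') :
    ∀ x ∈ st'.1, x ∈ st.1 ∨ ∃ u ∈ snap, ∃ row, PySem.List.pyGet? graph u = some row ∧ x ∈ row := by
  induction snap generalizing st with
  | nil =>
    simp only [sweep, Option.some.injEq] at h; subst h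
    exact fun x hx => Or.inl hx
  | cons u rest ih =>
    simp only [sweep] at h
    split at h
    · exact absurd h (by simp)
    · rename_i row hrow
      intro x hx
      rcases ih _ h x hx with h' | ⟨u', hu', row', hrow', hxr⟩
      · rcases sweepRow_sound row st x h' with h'' | h''
        · exact Or.inl h''
        · exact Or.inr ⟨u, by simp, row, hrow, h''⟩
      · exact Or.inr ⟨u', by simp [hu'], row', hrow', hxr⟩

lemma sweep_flag (graph : List (List Int)) (snap : List Int) (st st' : PySem.Set Int × Bool)
    (h : sweep graph snap st = some st') (hf : st.2 = true) : st'.2 = true := by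
  induction snap generalizing st with
  | nil => simp only [sweep, Option.some.injEq] at h; subst h; exact hf
  | cons u rest ih =>
    simp only [sweep] at h
    split at h
    · exact absurd h (by simp)
    · exact ih _ h (sweepRow_flag _ st hf)

lemma sweep_false (graph : List (List Int)) (snap : List Int) (st st' : PySem.Set Int × Bool)
    (h : sweep graph snap st = some st') (hc : st'.2 = false) :
    st'.1 = st.1 ∧
    (∀ u ∈ snap, ∀ row, PySem.List.pyGet? graph u = some row → ∀ v ∈ row, v ∈ st.1) := by
  induction snap generalizing st with
  | nil =>
    simp only [sweep, Option.some.injEq] at h; subst h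
    exact ⟨rfl, by simp⟩
  | cons u rest ih =>
    simp only [sweep] at h
    split at h
    · exact absurd h (by simp)
    · rename_i row hrow
      obtain ⟨heq1, hcl⟩ := ih _ h
      have hflag : (sweepRow st row).2 = false := by
        cases hfs : (sweepRow st row).2
        · rfl
        · have := sweep_flag graph rest _ st' h hfs
          rw [this] at hc
          exact absurd hc (by simp)
      obtain ⟨heq2, hrowsub⟩ := sweepRow_false row st hflag
      rw [heq2] at heq1 hcl
      refine ⟨heq1, ?_⟩
      intro u' hu' row' hrow' v hv
      rcases List.mem_cons.mp hu' with h' | h'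
      · subst h'
        rw [hrow] at hrow'; injection hrow' with hr; subst hr
        exact hrowsub v hv
      · exact hcl u' h' row' hrow' v hv

-- B's loop computes (then sorts) a duplicate-free list whose members are exactly the closure
lemma dfsAltLoop_main (graph : List (List Int)) (R : Int → Prop)
    (hPre : ∀ row ∈ graph, ∀ v ∈ row, -(graph.length : Int) ≤ v ∧ v < graph.length)
    (hRstep : ∀ u row v, R u → PySem.List.pyGet? graph u = some row → v ∈ row → R v) :
    ∀ (visited : PySem.Set Int),
    visited.Nodup →
    (∀ x ∈ visited, R x ∧ (-(graph.length : Int) ≤ x ∧ x < graph.length)) →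
    ∃ l : List Int, dfsAltLoop graph visited = PySem.List.sorted l (fun x => x) ∧ l.Nodup ∧
      (∀ x ∈ visited, x ∈ l) ∧ (∀ x ∈ l, R x) ∧
      (∀ u ∈ l, ∀ row, PySem.List.pyGet? graph u = some row → ∀ v ∈ row, v ∈ l) := by
  intro visited
  induction visited using dfsAltLoop.induct (graph := graph) with
  | case1 x hnone =>
    intro _ hvR
    exfalso
    rcases sweep_none graph x (x, false) hnone with ⟨u, hu, hn⟩
    have hr := (hvR u hu).2
    rw [PySem.List.pyGet?_eq_none_iff] at hn
    exact hn ⟨hr.1, hr.2⟩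
  | case2 x v' hsw ih =>
    intro hnd hvR
    have hnd' := sweep_nodup graph x (x, false) (v', true) hsw hnd
    have hvR' : ∀ y ∈ v', R y ∧ (-(graph.length : Int) ≤ y ∧ y < graph.length) := by
      intro y hy
      rcases sweep_sound graph x _ _ hsw y hy with h | ⟨u, hu, row, hrow, hyr⟩
      · exact hvR y h
      · exact ⟨hRstep u row y (hvR u hu).1 hrow hyr,
          hPre row (mem_of_pyGet?_eq_some _ _ _ hrow) y hyr⟩
    obtain ⟨l, heq, hnd2, hsub, hsound, hcl⟩ := ih hnd' hvR'
    refine ⟨l, ?_, hnd2, fun y hy => hsub y (sweep_mono graph x _ _ hsw y hy), hsound, hcl⟩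
    rw [dfsAltLoop]
    split
    · rename_i h2; rw [hsw] at h2; all_goals exact absurd h2 (by simp)
    · rename_i v'' c'' h2
      rw [hsw] at h2
      injection h2 with h2'; injection h2' with hv2 hc2
      subst hv2; subst hc2
      simp only [dif_pos]
      exact heq
  | case3 x v' c' hsw hc =>
    intro hnd hvR
    obtain ⟨hveq, hclosure⟩ := sweep_false graph x (x, false) (v', c') hsw (by simpa using hc)
    have hveq' : v' = x := hveq
    refine ⟨x, ?_, hnd, fun y hy => hy, fun y hy => (hvR y hy).1, ?_⟩
    · rw [dfsAltLoop]
      split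
      · rename_i h2; rw [hsw] at h2
      · rename_i v'' c'' h2
        rw [hsw] at h2
        injection h2 with h2'; injection h2' with hv2 hc2
        subst hv2; subst hc2
        rw [dif_neg hc, hveq']
    · intro u hu row hrow v hv
      exact hclosure u hu row hrow v hv

-- ===== VERDICT (by name: the statement is the Claim_ definition above) =====
theorem dfs_spec : Claim_equal_dfs := by
  unfold Claim_equal_dfs
  intro node graph _ hpre
  unfold Spec_dfs
  obtain ⟨⟨hn1, hn2⟩, hrows⟩ := hpre
  have hRstep : ∀ u row v, Reach graph node u → PySem.List.pyGet? graph u = some row →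
      v ∈ row → Reach graph node v := fun _ _ _ hu hg hv => Reach.step hu hg hv
  obtain ⟨lA, hAeq, hAnd, _, hAs, hAsound, hAcl⟩ :=
    dfsLoop_main graph (Reach graph node) hrows hRstep [node] PySem.Set.empty []
      (by intro x hx; simp at hx; subst hx; exact ⟨Reach.refl, hn1, hn2⟩)
      (by intro x hx; simp [PySem.Set.empty] at hx)
      (by intro u hu; simp [PySem.Set.empty] at hu)
      (by simp [PySem.Set.empty]) (by simp)
  obtain ⟨lB, hBeq, hBnd, hBs, hBsound, hBcl⟩ :=
    dfsAltLoop_main graph (Reach graph node) hrows hRstep (PySem.Set.ofList [node])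
      (PySem.Set.nodup_ofList _)
      (by intro x hx; simp [PySem.Set.mem_ofList] at hx; subst hx
          exact ⟨Reach.refl, hn1, hn2⟩)
  have hnodeA : node ∈ lA := hAs node (by simp)
  have hnodeB : node ∈ lB := hBs node (by simp [PySem.Set.mem_ofList])
  have hmem : ∀ x, x ∈ lB ↔ x ∈ lA := by
    intro x
    constructor
    · intro hx; exact reach_subset graph node lA hnodeA hAcl x (hBsound x hx)
    · intro hx; exact reach_subset graph node lB hnodeB hBcl x (hAsound x hx)
  have hperm : lB.Perm lA := (List.perm_ext_iff_of_nodup hBnd hAnd).mpr hmem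
  show dfs node graph = dfs_alt node graph
  unfold dfs dfs_alt
  rw [hAeq, hBeq]
  exact (PySem.List.sorted_eq_sorted_of_perm lA lB (fun x => x)
    (fun a b h => h) hperm.symm)
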